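-- pv_equiv track=rewrite | github.com/himanshu-patel-dev/Competetive_Programming | String/substring_same_first_last_letter.py | substring_same_first_last_letter
-- ===== SOURCE A (Python) =====
-- from collections import defaultdict
--
-- def substring_same_first_last_letter(string):
-- 	"""
-- 	return no of substring in which first and last character are same
-- 	"""
-- 	d = defaultdict(int)
-- 	for e in string:
-- 		d[e] += 1
--
-- 	c = 0
-- 	for e,v in d.items():
-- 		if v > 1:
-- 			c += v*(v-1)//2
-- 	return c + len(string)
-- ===== SOURCE B (Python) =====
-- def substring_same_first_last_letter(string):
-- 	"""
-- 	return no of substring in which first and last character are same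
-- 	"""
-- 	seen = {}
-- 	total = 0
-- 	for ch in string:
-- 		n = seen.get(ch, 0) + 1
-- 		seen[ch] = n
-- 		total += n
-- 	return total
-- ===== Notes on version B (the rewrite author's own statement) =====
-- stated objective: simpler
-- what changed: B replaces A's two-phase count-then-combinatorics (build a frequency dict, then sum v*(v-1)//2 over it and add len) with a single pass that adds the running occurrence count of each character as it arrives; the second dict iteration, the closed-form term and the +len are gone.
import Mathlib
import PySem

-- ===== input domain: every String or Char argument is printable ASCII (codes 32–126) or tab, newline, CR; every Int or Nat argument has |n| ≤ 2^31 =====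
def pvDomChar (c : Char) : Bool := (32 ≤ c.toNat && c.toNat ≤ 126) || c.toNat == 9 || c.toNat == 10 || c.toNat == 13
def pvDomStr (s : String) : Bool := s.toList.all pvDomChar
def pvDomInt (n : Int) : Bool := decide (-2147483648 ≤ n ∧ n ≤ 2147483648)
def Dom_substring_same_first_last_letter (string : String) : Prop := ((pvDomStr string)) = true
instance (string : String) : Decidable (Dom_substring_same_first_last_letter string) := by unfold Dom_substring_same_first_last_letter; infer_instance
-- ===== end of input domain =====

-- B replaces A's count-then-combinatorics with one pass adding the running occurrence count (simpler decomposition; same O(n) cost).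


-- ===== PORT A =====
def substring_same_first_last_letter (string : String) : Int :=
  let d : PySem.Dict Char Int :=
    string.toList.foldl (fun d e => d.modify e 0 (· + 1)) PySem.Dict.empty
  let c : Int :=
    d.items.foldl
      (fun c p => if p.2 > 1 then c + PySem.Int.floordiv (p.2 * (p.2 - 1)) 2 else c) 0
  c + PySem.Str.len string

-- ===== PORT B =====
def substring_same_first_last_letter_alt (string : String) : Int :=
  (string.toList.foldl
    (fun (st : PySem.Dict Char Int × Int) ch =>
      let n := st.1.getD ch 0 + 1
      (st.1.insert ch n, st.2 + n))
    (PySem.Dict.empty, 0)).2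

-- ===== PRECONDITION & SPEC =====
def Spec_substring_same_first_last_letter (string : String) (out : Int) : Prop := out = substring_same_first_last_letter_alt string
instance (string : String) (out : Int) : Decidable (Spec_substring_same_first_last_letter string out) := by unfold Spec_substring_same_first_last_letter; infer_instance

-- ===== CLAIM (what is proved, stated in full; the proofs are below) =====
def Claim_equal_substring_same_first_last_letter : Prop := ∀ (string : String), Dom_substring_same_first_last_letter string → Spec_substring_same_first_last_letter string (substring_same_first_last_letter string)

-- ===== LEMMAS AND PROOFS =====

-- list-level value of A's body
def pvAList (l : List Char) : Int :=
  (PySem.Dict.counter l).items.foldl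
    (fun c p => if p.2 > 1 then c + PySem.Int.floordiv (p.2 * (p.2 - 1)) 2 else c) 0
  + l.length

-- B's loop step and list-level value of B's body
def pvStepB (st : PySem.Dict Char Int × Int) (ch : Char) : PySem.Dict Char Int × Int :=
  let n := st.1.getD ch 0 + 1
  (st.1.insert ch n, st.2 + n)

def pvBList (l : List Char) : Int :=
  (l.foldl pvStepB (PySem.Dict.empty, 0)).2

-- the triangular-number step in Nat
theorem pv_tri (c : Nat) : (c + 1) * c / 2 = c * (c - 1) / 2 + c := by
  have h : (c + 1) * c = c * (c - 1) + 2 * c := by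
    cases c with
    | zero => rfl
    | succ n => simp only [Nat.add_sub_cancel]; ring
  rw [h, Nat.add_mul_div_left _ _ (by norm_num : 0 < 2)]

-- A's per-key term equals the Nat closed form for every count
theorem pv_termA (n : Nat) :
    (if ((n : Int)) > 1 then
        PySem.Int.floordiv ((n : Int) * ((n : Int) - 1)) 2 else 0)
    = ((n * (n - 1) / 2 : Nat) : Int) := by
  match n with
  | 0 => decide
  | 1 => decide
  | (m + 2) =>
    have h1 : (1 : Int) < ((m + 2 : Nat) : Int) := by exact_mod_cast (by omega : 1 < m + 2)
    rw [if_pos h1]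
    have h2 : ((m + 2 : Nat) : Int) * (((m + 2 : Nat) : Int) - 1)
        = (((m + 2) * ((m + 2) - 1) : Nat) : Int) := by push_cast; ring
    rw [h2]
    exact_mod_cast PySem.Int.floordiv_natCast ((m + 2) * ((m + 2) - 1)) 2

-- A's accumulating fold is the sum of its per-item terms
theorem pv_foldA (l : List (Char × Int)) (a : Int) :
    l.foldl (fun c p => if p.2 > 1 then c + PySem.Int.floordiv (p.2 * (p.2 - 1)) 2 else c) a
    = a + (l.map (fun p => if p.2 > 1 then PySem.Int.floordiv (p.2 * (p.2 - 1)) 2 else 0)).sum := by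
  induction l generalizing a with
  | nil => simp
  | cons x xs ih =>
    simp only [List.foldl_cons, List.map_cons, List.sum_cons, ih]
    split_ifs <;> ring

-- A's value in closed form: a sum of triangular terms over the distinct characters, plus the length
def pvSumA (l : List Char) : Int :=
  ((PySem.Set.ofList l).map (fun k => ((l.count k * (l.count k - 1) / 2 : Nat) : Int))).sum

theorem pvAList_eq_sum (l : List Char) : pvAList l = pvSumA l + l.length := by
  unfold pvAList pvSumA
  rw [pv_foldA, PySem.Dict.items_counter, List.map_map]
  have : ((fun p : Char × Int => if p.2 > 1 then PySem.Int.floordiv (p.2 * (p.2 - 1)) 2 else 0)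
        ∘ fun k => (k, (l.count k : Int)))
      = fun k => ((l.count k * (l.count k - 1) / 2 : Nat) : Int) := by
    funext k
    exact pv_termA (l.count k)
  rw [this]
  ring

-- recurrence for A's closed form: appending x adds (count of x so far) + 1
theorem pvSumA_append (l : List Char) (x : Char) :
    pvSumA (l ++ [x]) = pvSumA l + l.count x := by
  unfold pvSumA
  rw [PySem.Set.ofList_append_singleton]
  by_cases hx : x ∈ PySem.Set.ofList l
  · rw [PySem.Set.add_of_mem hx]
    have hnd := PySem.Set.nodup_ofList l
    have hperm := List.perm_cons_erase hx
    have hsum := fun (f : Char → Int) => (hperm.map f).sum_eq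
    rw [hsum, hsum, List.map_cons, List.map_cons, List.sum_cons, List.sum_cons]
    have herase : ∀ k ∈ (PySem.Set.ofList l).erase x,
        (((l ++ [x]).count k * ((l ++ [x]).count k - 1) / 2 : Nat) : Int)
        = ((l.count k * (l.count k - 1) / 2 : Nat) : Int) := by
      intro k hk
      have hk' : k ≠ x := (hnd.mem_erase_iff.mp hk).1
      simp [List.count_append, Ne.symm hk']
    rw [List.map_congr_left herase]
    have hcx : (l ++ [x]).count x = l.count x + 1 := by
      simp [List.count_append]
    have hmem : x ∈ l := (PySem.Set.mem_ofList l x).mp hx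
    rw [hcx]
    have : (l.count x + 1) * (l.count x + 1 - 1) / 2 = l.count x * (l.count x - 1) / 2 + l.count x := by
      simpa using pv_tri (l.count x)
    rw [this]
    push_cast
    ring
  · rw [PySem.Set.add_of_not_mem hx]
    have hmem : x ∉ l := fun h => hx ((PySem.Set.mem_ofList l x).mpr h)
    have hcx : l.count x = 0 := List.count_eq_zero.mpr hmem
    have hsame : ∀ k ∈ PySem.Set.ofList l,
        (((l ++ [x]).count k * ((l ++ [x]).count k - 1) / 2 : Nat) : Int)
        = ((l.count k * (l.count k - 1) / 2 : Nat) : Int) := by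
      intro k hk
      have hk' : x ≠ k := fun h => hmem (h ▸ (PySem.Set.mem_ofList l k).mp hk)
      simp [List.count_append, hk']
    rw [List.map_append, List.sum_append, List.map_congr_left hsame]
    simp [List.count_append, List.count_singleton, hcx]

-- B's fold: the dict component is the plain insert-count fold
theorem pvStepB_fst (l : List Char) (d : PySem.Dict Char Int) (t : Int) :
    (l.foldl pvStepB (d, t)).1 = l.foldl (fun d x => d.insert x (d.getD x 0 + 1)) d := by
  induction l generalizing d t with
  | nil => rfl
  | cons x xs ih => simpa [pvStepB] using ih _ _

-- recurrence for B: appending x adds (count of x so far) + 1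
theorem pvBList_append (l : List Char) (x : Char) :
    pvBList (l ++ [x]) = pvBList l + l.count x + 1 := by
  unfold pvBList
  rw [List.foldl_append]
  show (l.foldl pvStepB (PySem.Dict.empty, 0)).2
      + ((l.foldl pvStepB (PySem.Dict.empty, 0)).1.getD x 0 + 1) = _
  rw [pvStepB_fst, PySem.Dict.getD_foldl_insert_add_one, PySem.Dict.getD_empty]
  ring

-- the two closed forms agree on every list
theorem pv_list_eq (l : List Char) : pvAList l = pvBList l := by
  induction l using List.reverseRecOn with
  | nil => rfl
  | append_singleton xs x ih =>
    rw [pvAList_eq_sum] at ih ⊢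
    rw [pvSumA_append, pvBList_append, ← ih]
    simp
    ring

-- ===== VERDICT (by name: the statement is the Claim_ definition above) =====
theorem substring_same_first_last_letter_spec : Claim_equal_substring_same_first_last_letter := by
  intro string _
  show substring_same_first_last_letter string = substring_same_first_last_letter_alt string
  have hA : substring_same_first_last_letter string = pvAList string.toList := by
    unfold substring_same_first_last_letter pvAList
    rw [PySem.Dict.counter_eq_foldl, PySem.Str.len_eq]
  have hB : substring_same_first_last_letter_alt string = pvBList string.toList := rfl
  rw [hA, hB, pv_list_eq]
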